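-- pv_equiv track=rewrite | github.com/TomerKigel/IncrementalMaxSum | utils.py | prep_permutate
-- ===== SOURCE A (Python) =====
-- import copy
--
-- def prep_permutate(source : dict,value : int) -> dict:
--     res = {}
--     max_indexes = []
--     indexes = []
--     for key in source.keys():
--         max_indexes.append(len(source[key]))
--         indexes.append(0)
--     for row in range(0,value):
--         res[row] = copy.deepcopy(indexes)
--         if row == value - 1:
--             return res
--         place = 0
--         placed = False
--         while not placed:
--             if indexes[place] < max_indexes[place]-1:
--                 indexes[place]+=1
--                 placed = True
--             else:
--                 indexes[place] = 0
--                 place+=1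
--     return res
-- ===== SOURCE B (Python) =====
-- def prep_permutate(source: dict, value: int) -> dict:
--     # Direct positional (mixed-radix) decomposition of each row number,
--     # instead of A's stateful carry propagation between rows.  Positions
--     # with at most one choice always hold index 0 and consume no quotient.
--     if value <= 0:
--         return {}
--     radices = [len(v) for v in source.values()]
--     res = {0: [0] * len(radices)}
--     for row in range(1, value):
--         digits = []
--         q = row
--         for m in radices:
--             if m > 1:
--                 digits.append(q % m)
--                 q //= m
--             else:
--                 digits.append(0)
--         res[row] = digits
--     return res
-- ===== Notes on version B (the rewrite author's own statement) =====
-- stated objective: alternative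
-- what changed: B computes each row's index list directly by mixed-radix decomposition of the row number (q % m, q //= m over the radices) instead of A's stateful little-endian carry increment between rows.
import Mathlib
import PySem

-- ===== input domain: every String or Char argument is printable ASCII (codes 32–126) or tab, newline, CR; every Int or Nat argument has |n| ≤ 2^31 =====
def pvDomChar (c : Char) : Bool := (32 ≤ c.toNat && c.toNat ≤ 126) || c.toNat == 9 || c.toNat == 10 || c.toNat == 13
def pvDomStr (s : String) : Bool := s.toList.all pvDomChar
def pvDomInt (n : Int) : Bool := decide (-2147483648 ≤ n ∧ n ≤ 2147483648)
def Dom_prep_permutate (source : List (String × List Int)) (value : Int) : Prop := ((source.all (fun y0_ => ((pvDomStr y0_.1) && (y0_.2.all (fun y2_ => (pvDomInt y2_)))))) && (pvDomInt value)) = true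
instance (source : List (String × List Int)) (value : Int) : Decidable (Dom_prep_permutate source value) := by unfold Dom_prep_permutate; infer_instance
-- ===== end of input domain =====

-- B replaces A's stateful carry increment between rows by a direct mixed-radix
-- decomposition of each row number (objective: alternative, same cost).

-- ===== PORT A =====

-- A's inner `while not placed` loop: walk `place` from the front, incrementing
-- the first digit that is below its maximum, zeroing the ones passed over.
-- `none` = the walk ran off the end of the list (Python IndexError).
def pvIncrA : List Int → List Int → Option (List Int)
  | i :: is, m :: ms =>
      if i < m - 1 then some ((i + 1) :: is)
      else match pvIncrA is ms with
           | some rest => some (0 :: rest)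
           | none => none
  | _, _ => none

-- A's outer `for row in range(0, value)` loop, carrying res and indexes.
def pvLoopA (value : Int) (maxes : List Int) :
    List Int → List Int → List (Int × List Int) → List (Int × List Int)
  | [], _, res => res
  | row :: rest, indexes, res =>
      let res' := res ++ [(row, indexes)]
      if row == value - 1 then res'
      else match pvIncrA indexes maxes with
           | some ix => pvLoopA value maxes rest ix res'
           | none => res'   -- Python raises IndexError here (excluded by Pre_)

def prep_permutate (source : List (String × List Int)) (value : Int) : List (Int × List Int) :=
  let max_indexes := source.map (fun kv => (kv.2.length : Int))
  let indexes := source.map (fun _ => (0 : Int))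
  pvLoopA value max_indexes (PySem.List.pyRange 0 value 1) indexes []

-- ===== PORT B =====

-- B's inner `for m in radices` loop: mixed-radix digits of q.
def pvDigits : Int → List Int → List Int
  | _, [] => []
  | q, m :: ms =>
      if 1 < m then PySem.Int.mod q m :: pvDigits (PySem.Int.floordiv q m) ms
      else 0 :: pvDigits q ms

def prep_permutate_alt (source : List (String × List Int)) (value : Int) : List (Int × List Int) :=
  if value ≤ 0 then []
  else
    let radices := source.map (fun kv => (kv.2.length : Int))
    let first : Int × List Int := (0, radices.map (fun _ => (0 : Int)))
    first :: (PySem.List.pyRange 1 value 1).map (fun row => (row, pvDigits row radices))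

-- ===== PRECONDITION & SPEC =====
-- Pre_ excludes (a) inputs where A raises IndexError: value ≥ 2 exceeding the
-- number of reachable index states ∏ max(1, len) (empty/one-element lists act as
-- radix 1 in A's carry); (b) association lists with duplicate keys, on which the
-- Python dict collapses entries and an assoc-list port cannot match.
def Pre_prep_permutate (source : List (String × List Int)) (value : Int) : Prop :=
  (source.map Prod.fst).Nodup ∧
  (value ≤ 1 ∨ value ≤ (source.map (fun kv => max 1 (kv.2.length : Int))).prod)
instance (source : List (String × List Int)) (value : Int) : Decidable (Pre_prep_permutate source value) := by unfold Pre_prep_permutate; infer_instance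

def pvWitness_prep_permutate : (List (String × List Int)) × Int :=
  ([("a", [7, 8]), ("b", [1, 2, 3])], 6)

def Spec_prep_permutate (source : List (String × List Int)) (value : Int) (out : List (Int × List Int)) : Prop := out = prep_permutate_alt source value
instance (source : List (String × List Int)) (value : Int) (out : List (Int × List Int)) : Decidable (Spec_prep_permutate source value out) := by unfold Spec_prep_permutate; infer_instance

-- ===== CLAIM (what is proved, stated in full; the proofs are below) =====
def Claim_equal_prep_permutate : Prop := ∀ (source : List (String × List Int)) (value : Int), Dom_prep_permutate source value → Pre_prep_permutate source value → Spec_prep_permutate source value (prep_permutate source value)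

-- ===== LEMMAS AND PROOFS =====

theorem pv_witness_ok :
    Dom_prep_permutate pvWitness_prep_permutate.1 pvWitness_prep_permutate.2 ∧
    Pre_prep_permutate pvWitness_prep_permutate.1 pvWitness_prep_permutate.2 := by
  constructor <;> decide


-- (r+1) in terms of r when the low digit does not overflow
theorem pv_step_no_carry (m r : Int) (hm : 0 < m) (hnn : 0 ≤ r % m) (h : r % m < m - 1) :
    (r + 1) % m = r % m + 1 ∧ (r + 1) / m = r / m := by
  have hd : m * (r / m) + r % m = r := Int.mul_ediv_add_emod r m
  have hr1 : r + 1 = (r % m + 1) + m * (r / m) := by linarith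
  constructor
  · rw [hr1, Int.add_mul_emod_self_left, Int.emod_eq_of_lt (by omega) (by omega)]
  · rw [hr1, Int.add_mul_ediv_left _ _ (by omega : m ≠ 0),
      Int.ediv_eq_zero_of_lt (by omega) (by omega), zero_add]

-- (r+1) in terms of r when the low digit overflows
theorem pv_step_carry (m r : Int) (hm : 0 < m) (h : r % m = m - 1) :
    (r + 1) % m = 0 ∧ (r + 1) / m = r / m + 1 := by
  have hd : m * (r / m) + r % m = r := Int.mul_ediv_add_emod r m
  have hr1 : r + 1 = m * (r / m + 1) := by linarith [hd, h.ge, h.le]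
  constructor
  · rw [hr1, Int.mul_emod_right]
  · rw [hr1, Int.mul_ediv_cancel_left _ (by omega : m ≠ 0)]

-- digits of 0 are all zero
theorem pvDigits_zero (ms : List Int) : pvDigits 0 ms = ms.map (fun _ => (0 : Int)) := by
  induction ms with
  | nil => rfl
  | cons m ms ih =>
      simp only [pvDigits, List.map]
      split_ifs with h
      · rw [PySem.Int.mod_eq_emod_of_pos (by omega), PySem.Int.floordiv_eq_ediv_of_pos (by omega)]
        simp [ih]
      · simp [ih]

-- the carry step maps digits of r to digits of r+1 while r+1 is still reachable
theorem pvIncrA_digits (ms : List Int) (hms : ∀ m ∈ ms, 0 ≤ m) (r : Int) (hr : 0 ≤ r)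
    (hlt : r + 1 < (ms.map (fun m => max 1 m)).prod) :
    pvIncrA (pvDigits r ms) ms = some (pvDigits (r + 1) ms) := by
  induction ms generalizing r with
  | nil => simp at hlt; omega
  | cons m ms ih =>
      have hm : 0 ≤ m := hms m (by simp)
      have hms' : ∀ x ∈ ms, 0 ≤ x := fun x hx => hms x (by simp [hx])
      have hprodpos : 0 < (ms.map (fun m => max 1 m)).prod := by
        apply List.prod_pos
        intro x hx
        simp only [List.mem_map] at hx
        obtain ⟨y, _, rfl⟩ := hx
        omega
      simp only [List.map, List.prod_cons] at hlt
      by_cases h1 : 1 < m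
      · have hmpos : (0 : Int) < m := by omega
        simp only [pvDigits, if_pos h1,
          PySem.Int.mod_eq_emod_of_pos hmpos, PySem.Int.floordiv_eq_ediv_of_pos hmpos]
        have hmodlt : r % m < m := Int.emod_lt_of_pos r hmpos
        have hmodnn : 0 ≤ r % m := Int.emod_nonneg r (by omega)
        by_cases hcar : r % m < m - 1
        · -- no carry: (r+1) % m = r % m + 1, (r+1) / m = r / m
          simp only [pvIncrA, if_pos hcar]
          obtain ⟨hmod, hdiv⟩ := pv_step_no_carry m r hmpos hmodnn hcar
          rw [hmod, hdiv]
        · -- carry: r % m = m - 1, so (r+1) % m = 0 and (r+1)/m = r/m + 1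
          have hrm : r % m = m - 1 := by omega
          have hdec : r = m * (r / m) + (m - 1) := by
            have := Int.mul_ediv_add_emod r m; omega
          have hqnn : 0 ≤ r / m := Int.ediv_nonneg hr (by omega)
          have hqlt : r / m + 1 < (ms.map (fun m => max 1 m)).prod := by
            have hmax : max 1 m = m := by omega
            rw [hmax] at hlt
            nlinarith [hlt, hdec]
          have hrec := ih hms' (r / m) hqnn hqlt
          simp only [pvIncrA, if_neg hcar, hrec]
          obtain ⟨hmod, hdiv⟩ := pv_step_carry m r hmpos hrm
          rw [hmod, hdiv]
      · -- radix ≤ 1: digit is 0, always carries, quotient unchanged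
        have hmax : max 1 m = 1 := by omega
        rw [hmax, one_mul] at hlt
        have hrec := ih hms' r hr hlt
        simp only [pvDigits, if_neg h1, pvIncrA]
        have hnc : ¬ ((0 : Int) < m - 1) := by omega
        simp only [if_neg hnc, hrec]

-- the main loop invariant: starting from the digits of r, A's loop emits
-- exactly B's rows r, r+1, …, value-1
theorem pvLoopA_eq (ms : List Int) (hms : ∀ m ∈ ms, 0 ≤ m) (value : Int)
    (hval : value ≤ (ms.map (fun m => max 1 m)).prod) :
    ∀ (n : Nat) (r : Int) (res : List (Int × List Int)), 0 ≤ r → r < value → (value - r).toNat = n →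
    pvLoopA value ms (PySem.List.pyRange r value 1) (pvDigits r ms) res =
      res ++ (PySem.List.pyRange r value 1).map (fun row => (row, pvDigits row ms)) := by
  intro n
  induction n with
  | zero => intro r res h0 hlt hn; omega
  | succ k ih =>
      intro r res h0 hlt hn
      rw [PySem.List.pyRange_one_cons hlt]
      simp only [pvLoopA, List.map]
      by_cases hlast : r = value - 1
      · have : (r == value - 1) = true := by simp [hlast]
        rw [this]
        simp only [if_true]
        have hnil : PySem.List.pyRange (r + 1) value 1 = [] :=
          PySem.List.pyRange_one_eq_nil (by omega)
        simp [hnil]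
      · have heq : (r == value - 1) = false := by simp [hlast]
        rw [heq]
        simp only [Bool.false_eq_true, if_false]
        have hstep : pvIncrA (pvDigits r ms) ms = some (pvDigits (r + 1) ms) :=
          pvIncrA_digits ms hms r h0 (by omega)
        rw [hstep]
        show pvLoopA value ms (PySem.List.pyRange (r + 1) value 1) (pvDigits (r + 1) ms)
              (res ++ [(r, pvDigits r ms)]) = _
        rw [ih (r + 1) (res ++ [(r, pvDigits r ms)]) (by omega) (by omega) (by omega)]
        simp

theorem prep_permutate_eq (source : List (String × List Int)) (value : Int)
    (hpre : Pre_prep_permutate source value) :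
    prep_permutate source value = prep_permutate_alt source value := by
  obtain ⟨-, hpre⟩ := hpre
  by_cases hv0 : value ≤ 0
  · unfold prep_permutate prep_permutate_alt
    rw [PySem.List.pyRange_one_eq_nil (by omega)]
    simp [pvLoopA, hv0]
  · set ms := source.map (fun kv => (kv.2.length : Int)) with hmsdef
    have hms : ∀ m ∈ ms, 0 ≤ m := by
      intro m hm
      rw [hmsdef] at hm
      simp only [List.mem_map] at hm
      obtain ⟨kv, -, rfl⟩ := hm
      positivity
    have hzeros : source.map (fun _ => (0 : Int)) = pvDigits 0 ms := by
      rw [pvDigits_zero, hmsdef, List.map_map]; rfl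
    by_cases hv1 : value = 1
    · subst hv1
      unfold prep_permutate prep_permutate_alt
      rw [PySem.List.pyRange_one_cons (by omega), PySem.List.pyRange_one_eq_nil (by omega)]
      simp only [pvLoopA]
      norm_num
      simp [Function.comp_def, List.map_const']
    · -- value ≥ 2, so value ≤ ∏ max 1 (len)
      have hval : value ≤ (ms.map (fun m => max 1 m)).prod := by
        rcases hpre with h | h
        · omega
        · rw [hmsdef, List.map_map]; simpa [Function.comp] using h
      unfold prep_permutate prep_permutate_alt
      rw [if_neg hv0, ← hmsdef, hzeros]
      rw [pvLoopA_eq ms hms value hval (value - 0).toNat 0 [] le_rfl (by omega) rfl]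
      rw [PySem.List.pyRange_one_cons (by omega)]
      simp [pvDigits_zero]

-- ===== VERDICT (by name: the statement is the Claim_ definition above) =====
theorem prep_permutate_spec : Claim_equal_prep_permutate := by
  intro source value _ hpre
  unfold Spec_prep_permutate
  exact prep_permutate_eq source value hpre
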